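-- pv_equiv track=rewrite | github.com/ManuelZepeda16/GestionCafeteria | cafeteria.py | validFormat
-- ===== SOURCE A (Python) =====
-- def validFormat(array):
--     #Separar la entrada por comas
--     splitArray = array.split(",")
--
--     #Eliminar los espacios en blanco alrededor de los elementos
--     for i in range(0, len(splitArray)):
--         splitArray[i] = splitArray[i].strip()
--
--     #Verificar el largo mínimo y máximo
--     if len(splitArray) == 0 or len(splitArray) == 1 or len(splitArray) > 6:
--         return False
--
--     #Verificar que el primer valor sea un alpha y que los demás sean números
--     for i in range(1, len(splitArray)):
--         if not splitArray[0].isalpha() or not splitArray[i].isnumeric():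
--             return False
--
--     #Verificar el largo del nombre
--     if len(splitArray[0]) < 2 or len(splitArray[0]) > 15:
--         return False
--
--     #Quitar el nombre de la lista
--     splitArray.pop(0)
--
--     #Pasar a valores enteros la lista resultante
--     intList = [int(x) for x in splitArray]
--
--     #Comprobar el rango de los números
--     for i in range(0, len(intList)):
--         if intList[i] < 1 or intList[i] > 48:
--             return False
--
--     #Verificar que los valores sean ingresados en orden y que estos no se repitan
--     if intList != sorted(set(intList)):
--         return False
--
--     return True
-- ===== SOURCE B (Python) =====
-- def validFormat(array):
--     parts = [p.strip() for p in array.split(",")]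
--     if not (2 <= len(parts) <= 6):
--         return False
--     name = parts[0]
--     if not (name.isalpha() and all(p.isnumeric() for p in parts[1:])):
--         return False
--     if not (2 <= len(name) <= 15):
--         return False
--     nums = [int(p) for p in parts[1:]]
--     prev = 0
--     for v in nums:
--         if v < 1 or v > 48 or v <= prev:
--             return False
--         prev = v
--     return True
-- ===== Notes on version B (the rewrite author's own statement) =====
-- stated objective: simpler
-- what changed: B replaces A's separate range-check loop plus the intList != sorted(set(intList)) sort-and-dedup comparison with a single linear scan that keeps the previous value and checks 1<=v<=48 and v>prev; the sort and the set disappear.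
import Mathlib
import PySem

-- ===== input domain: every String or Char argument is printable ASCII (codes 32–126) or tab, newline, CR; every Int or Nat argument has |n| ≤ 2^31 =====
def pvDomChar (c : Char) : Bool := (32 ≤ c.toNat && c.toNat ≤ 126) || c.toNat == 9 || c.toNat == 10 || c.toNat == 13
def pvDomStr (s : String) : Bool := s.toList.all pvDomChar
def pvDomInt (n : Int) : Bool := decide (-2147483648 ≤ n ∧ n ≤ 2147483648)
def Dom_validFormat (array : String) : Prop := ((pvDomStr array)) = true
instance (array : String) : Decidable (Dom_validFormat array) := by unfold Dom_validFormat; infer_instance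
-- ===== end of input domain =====

-- B replaces A's per-index range-check loop plus the `intList != sorted(set(intList))` sort-and-dedup
-- comparison by one linear scan keeping the previous value (objective: simpler; no sort, no set).
-- On the ASCII domain `.isnumeric()` coincides with `.isdigit` and `int()` then always succeeds,
-- so both programs are total here.

-- ===== PORT A =====
-- the loop 'for i in range(1, len): if not splitArray[0].isalpha() or not splitArray[i].isnumeric(): return False'
def aAlphaNumLoop (name : String) : List String → Bool
  | [] => true
  | x :: xs =>
    if !(PySem.Str.strIsalpha name) || !(PySem.Str.strIsdigit x) then false
    else aAlphaNumLoop name xs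

-- the loop 'for i in range(0, len(intList)): if intList[i] < 1 or intList[i] > 48: return False'
def aRangeLoop : List Int → Bool
  | [] => true
  | v :: vs => if v < 1 || v > 48 then false else aRangeLoop vs

def validFormat (array : String) : Bool :=
  -- array.split(",") (sep ≠ "" so split? is always some), then .strip() of every element
  let splitArray := ((PySem.Str.split? array ",").getD []).map PySem.Str.strip
  if splitArray.length == 0 || splitArray.length == 1 || splitArray.length > 6 then false
  else
    match splitArray with
    | [] => false  -- unreachable: split always returns a nonempty list
    | name :: rest =>
      if !(aAlphaNumLoop name rest) then false
      else if PySem.Str.len name < 2 || PySem.Str.len name > 15 then false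
      else
        -- int(x): never none here — each x passed .isnumeric() above (ASCII digits, nonempty)
        let intList := rest.map (fun x => (PySem.Int.ofStr? x).getD 0)
        if !(aRangeLoop intList) then false
        else if intList ≠ PySem.List.sorted (PySem.Set.ofList intList) (fun x => x) then false
        else true

-- ===== PORT B =====
-- one scan: each value in [1,48] and strictly above the previous one
def bScan (prev : Int) : List Int → Bool
  | [] => true
  | v :: vs => if v < 1 || v > 48 || v ≤ prev then false else bScan v vs

def validFormat_alt (array : String) : Bool :=
  let parts := ((PySem.Str.split? array ",").getD []).map PySem.Str.strip
  match parts with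
  | [] => false  -- unreachable: split always returns a nonempty list
  | name :: rest =>
    if parts.length < 2 || parts.length > 6 then false
    else if !(PySem.Str.strIsalpha name && rest.all PySem.Str.strIsdigit) then false
    else if PySem.Str.len name < 2 || PySem.Str.len name > 15 then false
    else bScan 0 (rest.map (fun p => (PySem.Int.ofStr? p).getD 0))

-- ===== PRECONDITION & SPEC =====
def Spec_validFormat (array : String) (out : Bool) : Prop := out = validFormat_alt array
instance (array : String) (out : Bool) : Decidable (Spec_validFormat array out) := by unfold Spec_validFormat; infer_instance

-- ===== CLAIM (what is proved, stated in full; the proofs are below) =====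
def Claim_equal_validFormat : Prop := ∀ (array : String), Dom_validFormat array → Spec_validFormat array (validFormat array)

-- ===== LEMMAS AND PROOFS =====

-- A's index loop checks 'name isalpha' once per element and each element isdigit
theorem aAlphaNumLoop_eq (name : String) (rest : List String) (h : rest ≠ []) :
    aAlphaNumLoop name rest = (PySem.Str.strIsalpha name && rest.all PySem.Str.strIsdigit) := by
  induction rest with
  | nil => exact absurd rfl h
  | cons x xs ih =>
    by_cases hx : xs = []
    · subst hx
      simp only [aAlphaNumLoop, List.all_cons, List.all_nil, Bool.and_true]
      cases PySem.Str.strIsalpha name <;> cases PySem.Str.strIsdigit x <;> simp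
    · simp only [aAlphaNumLoop, ih hx, List.all_cons]
      cases PySem.Str.strIsalpha name <;> cases PySem.Str.strIsdigit x <;> simp

-- B's scan = A's range loop together with strict increase from prev
theorem bScan_eq (ints : List Int) (prev : Int) :
    bScan prev ints = (aRangeLoop ints && decide (List.IsChain (· < ·) (prev :: ints))) := by
  induction ints generalizing prev with
  | nil => simp [bScan, aRangeLoop]
  | cons v vs ih =>
    simp only [bScan, aRangeLoop, ih v, List.isChain_cons_cons]
    by_cases h1 : v < 1
    · simp [h1]
    · by_cases h3 : v ≤ prev
      · have hnp : ¬ prev < v := by omega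
        simp [h1, h3, hnp]
      · by_cases h2 : v > 48
        · simp [h1, h2, h3]
        · have hpv : prev < v := by omega
          simp [h1, h2, h3, hpv]

-- A's 'intList == sorted(set(intList))' is exactly strict increase
theorem sorted_set_eq_iff (ints : List Int) :
    ints = PySem.List.sorted (PySem.Set.ofList ints) (fun x => x) ↔ List.Pairwise (· < ·) ints := by
  constructor
  · intro h
    rw [h]
    exact PySem.List.sorted_ofList_pairwise_lt ints
  · intro h
    have hnd : ints.Nodup := h.imp (fun hlt => ne_of_lt hlt)
    rw [PySem.Set.ofList_eq_self_of_nodup ints hnd,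
      PySem.List.sorted_eq_of_perm_of_pairwise_lt ints ints _ (List.Perm.refl ints) h]

-- the core equivalence, on the stripped pieces after the name
theorem core_eq (name : String) (rest : List String) (h : rest ≠ []) :
    (if !(aAlphaNumLoop name rest) then false
     else if PySem.Str.len name < 2 || PySem.Str.len name > 15 then false
     else
       let intList := rest.map (fun x => (PySem.Int.ofStr? x).getD 0)
       if !(aRangeLoop intList) then false
       else if intList ≠ PySem.List.sorted (PySem.Set.ofList intList) (fun x => x) then false
       else true)
    = (if !(PySem.Str.strIsalpha name && rest.all PySem.Str.strIsdigit) then false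
       else if PySem.Str.len name < 2 || PySem.Str.len name > 15 then false
       else bScan 0 (rest.map (fun p => (PySem.Int.ofStr? p).getD 0))) := by
  rw [aAlphaNumLoop_eq name rest h]
  cases hA : (PySem.Str.strIsalpha name && rest.all PySem.Str.strIsdigit)
  · simp
  · simp only [Bool.not_true, Bool.false_eq_true, if_false]
    cases hN : (PySem.Str.len name < 2 || PySem.Str.len name > 15)
    · simp only [Bool.false_eq_true, if_false]
      rw [bScan_eq]
      set ints := rest.map (fun x => (PySem.Int.ofStr? x).getD 0) with hi
      cases hR : aRangeLoop ints
      · simp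
      · simp only [Bool.not_true, Bool.false_eq_true, if_false, Bool.true_and]
        by_cases hP : List.Pairwise (· < ·) ints
        · have hc : List.IsChain (· < ·) (0 :: ints) := by
            cases hil : ints with
            | nil => exact List.IsChain.singleton 0
            | cons v vs =>
              rw [List.isChain_cons_cons]
              refine ⟨?_, List.isChain_iff_pairwise.mpr (hil ▸ hP)⟩
              rw [hil] at hR
              by_cases h1 : v < 1
              · simp [aRangeLoop, h1] at hR
              · omega
          have he : ints = PySem.List.sorted (PySem.Set.ofList ints) (fun x => x) :=
            (sorted_set_eq_iff ints).mpr hP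
          simp [← he, hc]
        · have hnc : ¬ List.IsChain (· < ·) (0 :: ints) := by
            intro hc
            cases hil : ints with
            | nil => exact hP (by rw [hil]; exact List.Pairwise.nil)
            | cons v vs =>
              rw [hil, List.isChain_cons_cons] at hc
              exact hP (hil ▸ List.isChain_iff_pairwise.mp hc.2)
          have hne : ints ≠ PySem.List.sorted (PySem.Set.ofList ints) (fun x => x) := by
            intro h; exact hP ((sorted_set_eq_iff ints).mp h)
          simp [hne, hnc]
    · simp

-- both ports split and strip identically; lengths line up
theorem len_guard_eq (n : Nat) :
    ((n == 0 || n == 1 || decide (n > 6)) = false) ↔ ((decide (n < 2) || decide (n > 6)) = false) := by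
  simp only [Bool.or_eq_false_iff, beq_eq_false_iff_ne, decide_eq_false_iff_not]
  omega

-- ===== VERDICT (by name: the statement is the Claim_ definition above) =====
theorem validFormat_spec : Claim_equal_validFormat := by
  intro array _
  unfold Spec_validFormat validFormat validFormat_alt
  cases hps : ((PySem.Str.split? array ",").getD []).map PySem.Str.strip with
  | nil => simp
  | cons name rest =>
    simp only []
    cases hg : ((name :: rest).length == 0 || (name :: rest).length == 1 ||
        decide ((name :: rest).length > 6)) with
    | true =>
      have : (decide ((name :: rest).length < 2) || decide ((name :: rest).length > 6)) = true := by
        by_contra hc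
        rw [Bool.not_eq_true] at hc
        rw [(len_guard_eq _).mpr hc] at hg
        exact Bool.false_ne_true hg
      simp only [this, if_true]
    | false =>
      have h2 : (decide ((name :: rest).length < 2) || decide ((name :: rest).length > 6)) = false :=
        (len_guard_eq _).mp hg
      have hne : rest ≠ [] := by
        intro hr
        rw [hr] at hg
        simp at hg
      simp only [h2, Bool.false_eq_true, if_false]
      exact core_eq name rest hne
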